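-- pv_equiv track=rewrite | github.com/j-ichikawa/tsFire | pdf.py | __get_error_line_indexes
-- ===== SOURCE A (Python) =====
-- def __get_error_line_indexes(start_times):
--     """
--     return indexes elements with no date on both neighbors
--     :param start_times:
--     :return:
--     """
--     is_day_before_no_date = True
--     indexes = []
--     for i, t in enumerate(start_times):
--         # is not end element?
--         if i != len(start_times) - 1:
--             if ':' in start_times[i]:
--                 # is single line?
--                 if is_day_before_no_date and ':' not in start_times[i + 1]:
--                     indexes.append(i)
--                 is_day_before_no_date = False
--             else:
--                 is_day_before_no_date = True
--         else:
--             # end element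
--             if is_day_before_no_date and ':' in start_times[i]:
--                 indexes.append(i)
--
--     return indexes
-- ===== SOURCE B (Python) =====
-- def __get_error_line_indexes(start_times):
--     """
--     return indexes elements with no date on both neighbors
--     :param start_times:
--     :return:
--     """
--     n = len(start_times)
--     runs = []
--     i = 0
--     while i < n:
--         if ':' in start_times[i]:
--             j = i
--             while j < n and ':' in start_times[j]:
--                 j += 1
--             runs.append((i, j))
--             i = j
--         else:
--             i += 1
--     return [s for (s, e) in runs if e - s == 1]
-- ===== Notes on version B (the rewrite author's own statement) =====
-- stated objective: alternative
-- what changed: Replaces A's element-by-element scan with a carried 'previous had no colon' flag by a run-length decomposition: an outer while loop collects the maximal runs of consecutive ':'-containing elements as (start, end) pairs, and the answer is the start of each run of length exactly 1.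
import Mathlib
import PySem

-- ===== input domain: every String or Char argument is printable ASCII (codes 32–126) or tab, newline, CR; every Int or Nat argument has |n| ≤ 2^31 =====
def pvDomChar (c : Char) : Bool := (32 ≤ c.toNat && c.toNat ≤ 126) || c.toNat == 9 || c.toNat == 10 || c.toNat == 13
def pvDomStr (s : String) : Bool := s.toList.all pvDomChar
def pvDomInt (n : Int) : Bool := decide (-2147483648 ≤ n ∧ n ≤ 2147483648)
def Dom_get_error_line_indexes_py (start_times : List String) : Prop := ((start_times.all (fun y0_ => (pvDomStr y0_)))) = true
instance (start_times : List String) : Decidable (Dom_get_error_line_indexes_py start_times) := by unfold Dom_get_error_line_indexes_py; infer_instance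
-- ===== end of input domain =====

-- B replaces A's element-by-element scan with a carried "previous element had no colon" flag
-- by a run-length decomposition: an outer loop collects the maximal runs of consecutive
-- ':'-containing elements as (start, end) pairs and the answer is the start of each run of
-- length exactly 1; same cost, different algorithm.

-- ===== PORT A =====
-- the loop body of A: state = (is_day_before_no_date, indexes); p = (i, t) from enumerate
def pvStepA (start_times : List String) (st : Bool × List Int) (p : Int × String) : Bool × List Int :=
  let isDayBeforeNoDate := st.1
  let indexes := st.2
  let i := p.1
  if i ≠ (start_times.length : Int) - 1 then
    if PySem.Str.isIn ":" (PySem.List.pyGetD start_times i "") then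
      (false,
        if isDayBeforeNoDate && !(PySem.Str.isIn ":" (PySem.List.pyGetD start_times (i + 1) "")) then
          indexes ++ [i]
        else indexes)
    else (true, indexes)
  else
    (isDayBeforeNoDate,
      if isDayBeforeNoDate && PySem.Str.isIn ":" (PySem.List.pyGetD start_times i "") then
        indexes ++ [i]
      else indexes)

def get_error_line_indexes_py (start_times : List String) : List Int :=
  ((PySem.List.enumerate start_times 0).foldl (pvStepA start_times) (true, [])).2

-- ===== PORT B =====
-- ':' in start_times[j] (index always in range where B uses it)
def pvColonAt (st : List String) (j : Int) : Bool :=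
  PySem.Str.isIn ":" (PySem.List.pyGetD st j "")

-- inner while loop: `while j < n and ':' in start_times[j]: j += 1`
def pvRunEnd (st : List String) (n j : Int) : Int :=
  if h : j < n ∧ pvColonAt st j = true then pvRunEnd st n (j + 1) else j
termination_by (n - j).toNat
decreasing_by omega

-- outer while loop: collects the maximal colon-runs as (start, end) pairs
lemma pvRunEnd_ge (st : List String) (n j : Int) : j ≤ pvRunEnd st n j := by
  induction j using pvRunEnd.induct st n with
  | case1 j h ih => rw [pvRunEnd, dif_pos h]; omega
  | case2 j h => rw [pvRunEnd, dif_neg h]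

lemma pvRunEnd_step (st : List String) (n j : Int) (h : j < n ∧ pvColonAt st j = true) :
    j + 1 ≤ pvRunEnd st n j := by
  rw [pvRunEnd, dif_pos h]; exact pvRunEnd_ge st n (j + 1)

def pvRuns (st : List String) (n i : Int) : List (Int × Int) :=
  if h : i < n then
    if hc : pvColonAt st i = true then
      let j := pvRunEnd st n i
      (i, j) :: pvRuns st n j
    else
      pvRuns st n (i + 1)
  else []
termination_by (n - i).toNat
decreasing_by
  · have := pvRunEnd_step st n i ⟨h, hc⟩; omega
  · omega

def get_error_line_indexes_py_alt (start_times : List String) : List Int :=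
  let n : Int := (start_times.length : Int)
  let runs := pvRuns start_times n 0
  (runs.filter (fun p => p.2 - p.1 == 1)).map Prod.fst

-- ===== PRECONDITION & SPEC =====
def Spec_get_error_line_indexes_py (start_times : List String) (out : List Int) : Prop := out = get_error_line_indexes_py_alt start_times
instance (start_times : List String) (out : List Int) : Decidable (Spec_get_error_line_indexes_py start_times out) := by unfold Spec_get_error_line_indexes_py; infer_instance

-- ===== CLAIM (what is proved, stated in full; the proofs are below) =====
def Claim_equal_get_error_line_indexes_py : Prop := ∀ (start_times : List String), Dom_get_error_line_indexes_py start_times → Spec_get_error_line_indexes_py start_times (get_error_line_indexes_py start_times)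

-- ===== LEMMAS AND PROOFS =====

-- proof-side predicate: i is a colon index whose neighbors (if any) are not
def pvOk (st : List String) (i : Int) : Bool :=
  PySem.Str.isIn ":" (PySem.List.pyGetD st i "")
  && (i == 0 || !(PySem.Str.isIn ":" (PySem.List.pyGetD st (i - 1) "")))
  && (i == (st.length : Int) - 1 || !(PySem.Str.isIn ":" (PySem.List.pyGetD st (i + 1) "")))

-- the flag A carries once the elements of pre have been processed
def pvFlag (pre : List String) : Bool := !(PySem.Str.isIn ":" (pre.getLastD ""))

lemma pvFlag_nil : pvFlag [] = true := by decide

lemma pvFlag_concat (pre : List String) (x : String) :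
    pvFlag (pre ++ [x]) = !(PySem.Str.isIn ":" x) := by
  simp only [pvFlag, List.getLastD_concat]

lemma pvGetD_append_len (pre suf : List String) (x : String) :
    PySem.List.pyGetD (pre ++ x :: suf) ((pre.length : Int)) "" = x := by
  simp [PySem.List.pyGetD_natCast, List.getD]

lemma pvGetD_append_len_succ (pre suf : List String) (x y : String) :
    PySem.List.pyGetD (pre ++ x :: y :: suf) ((pre.length : Int) + 1) "" = y := by
  have h1 : ((pre.length : Int) + 1) = (((pre.length + 1 : Nat)) : Int) := by push_cast; ring
  rw [h1, PySem.List.pyGetD_natCast, List.getD_eq_getElem?_getD,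
    List.getElem?_append_right (by omega)]
  simp

lemma pvGetD_append_len_pred (pre suf : List String) (h : pre ≠ []) :
    PySem.List.pyGetD (pre ++ suf) ((pre.length : Int) - 1) "" = pre.getLastD "" := by
  have hl : 0 < pre.length := List.length_pos_iff.mpr h
  have h1 : ((pre.length : Int) - 1) = (((pre.length - 1 : Nat)) : Int) := by omega
  have hlt : pre.length - 1 < pre.length := by omega
  rw [h1]
  simp [PySem.List.pyGetD_natCast, List.getD, List.getElem?_append_left hlt,
    List.getElem?_eq_getElem hlt, List.getLastD_eq_getLast?, List.getLast?_eq_getElem?]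

-- left-neighbor clause of pvOk at i = pre.length equals the carried flag
lemma pvOk_left (pre suf : List String) :
    ((((pre.length : Int)) == 0) || !(PySem.Str.isIn ":" (PySem.List.pyGetD (pre ++ suf) ((pre.length : Int) - 1) ""))) = pvFlag pre := by
  cases pre with
  | nil =>
    simp only [List.length_nil, Nat.cast_zero, BEq.rfl, Bool.true_or, pvFlag_nil]
  | cons a pre' =>
    have h : (a :: pre') ≠ [] := by simp
    have hz : ((((a :: pre').length : Nat) : Int) == 0) = false := by
      rw [beq_eq_false_iff_ne]
      simp only [List.length_cons]
      push_cast
      omega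
    rw [pvGetD_append_len_pred _ _ h, hz, Bool.false_or, pvFlag]

-- A-side loop invariant: A's fold over the suffix appends exactly the pvOk-filtered indices
lemma pvLoop (st : List String) : ∀ (suf pre : List String) (acc : List Int),
    st = pre ++ suf →
    ((PySem.List.enumerate suf (pre.length : Int)).foldl (pvStepA st) (pvFlag pre, acc)).2
      = acc ++ (PySem.List.pyRange (pre.length : Int) (st.length : Int) 1).filter (pvOk st) := by
  intro suf
  induction suf with
  | nil =>
    intro pre acc hst
    subst hst
    simp [PySem.List.enumerate_nil, PySem.List.pyRange_one_eq_nil]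
  | cons x suf' ih =>
    intro pre acc hst
    have hlen : st.length = pre.length + 1 + suf'.length := by
      subst hst; simp; omega
    rw [PySem.List.enumerate_cons]
    have hx : PySem.List.pyGetD st ((pre.length : Int)) "" = x := by
      subst hst; exact pvGetD_append_len pre suf' x
    have hleft := pvOk_left pre (x :: suf')
    rw [← hst] at hleft
    have hrange : PySem.List.pyRange (pre.length : Int) (st.length : Int) 1
        = (pre.length : Int) :: PySem.List.pyRange ((pre.length : Int) + 1) (st.length : Int) 1 := by
      apply PySem.List.pyRange_one_cons; omega
    have hpre' : st = (pre ++ [x]) ++ suf' := by rw [hst]; simp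
    have hlen' : (((pre ++ [x]).length : Nat) : Int) = (pre.length : Int) + 1 := by
      simp
    cases suf' with
    | nil =>
      -- x is the last element
      have hi : ((pre.length : Int)) = (st.length : Int) - 1 := by
        simp only [List.length_nil] at hlen; omega
      have hok : pvOk st ((pre.length : Int)) = (PySem.Str.isIn ":" x && pvFlag pre) := by
        unfold pvOk
        rw [hx, hleft, ← hi]
        have hself : (((pre.length : Nat) : Int) == ((pre.length : Nat) : Int)) = true := by simp
        rw [hself, Bool.true_or, Bool.and_true]
      rw [hrange, PySem.List.enumerate_nil]
      simp only [List.foldl_cons, List.foldl_nil, pvStepA]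
      rw [if_neg (not_not_intro hi), hx]
      have hnil : PySem.List.pyRange ((pre.length : Int) + 1) (st.length : Int) 1 = [] := by
        apply PySem.List.pyRange_one_eq_nil; omega
      rw [hnil, List.filter_cons, List.filter_nil, hok]
      cases hf : pvFlag pre <;> cases hc : PySem.Str.isIn ":" x <;> simp
    | cons y suf'' =>
      -- x is not the last element
      have hne : ((pre.length : Int)) ≠ (st.length : Int) - 1 := by
        simp only [List.length_cons] at hlen
        omega
      have hy : PySem.List.pyGetD st ((pre.length : Int) + 1) "" = y := by
        subst hst; exact pvGetD_append_len_succ pre suf'' x y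
      have hb : ((((pre.length : Nat) : Int)) == (st.length : Int) - 1) = false := by
        rw [beq_eq_false_iff_ne]; exact hne
      have hok : pvOk st ((pre.length : Int))
          = (PySem.Str.isIn ":" x && pvFlag pre && !(PySem.Str.isIn ":" y)) := by
        unfold pvOk
        rw [hx, hleft, hy, hb, Bool.false_or]
      rw [List.foldl_cons]
      simp only [pvStepA]
      rw [if_pos hne, hx, hy, hrange, List.filter_cons]
      cases hc : PySem.Str.isIn ":" x
      · -- no colon at x: flag becomes true
        have hokf : pvOk st ((pre.length : Int)) = false := by
          rw [hok, hc, Bool.false_and, Bool.false_and]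
        rw [hokf]
        simp only [Bool.false_eq_true, if_false]
        have h := ih (pre ++ [x]) acc hpre'
        rw [pvFlag_concat, hc, Bool.not_false, hlen'] at h
        exact h
      · -- colon at x: flag becomes false
        have hokt : pvOk st ((pre.length : Int)) = (pvFlag pre && !(PySem.Str.isIn ":" y)) := by
          rw [hok, hc, Bool.true_and]
        rw [hokt]
        have h := ih (pre ++ [x])
          (if (pvFlag pre && !(PySem.Str.isIn ":" y)) = true then acc ++ [((pre.length : Nat) : Int)] else acc)
          hpre'
        rw [pvFlag_concat, hc, Bool.not_true, hlen'] at h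
        rw [if_pos (rfl : (true : Bool) = true), h]
        cases hcc : (pvFlag pre && !(PySem.Str.isIn ":" y)) <;> simp

-- B-side: properties of the inner loop pvRunEnd
lemma pvRunEnd_le (st : List String) (n j : Int) (h : j ≤ n) : pvRunEnd st n j ≤ n := by
  induction j using pvRunEnd.induct st n with
  | case1 j hcond ih => rw [pvRunEnd, dif_pos hcond]; exact ih (by omega)
  | case2 j hcond => rw [pvRunEnd, dif_neg hcond]; exact h

lemma pvRunEnd_mem (st : List String) (n j : Int) :
    ∀ k, j ≤ k → k < pvRunEnd st n j → pvColonAt st k = true := by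
  induction j using pvRunEnd.induct st n with
  | case1 j hcond ih =>
    intro k hk1 hk2
    rw [pvRunEnd, dif_pos hcond] at hk2
    rcases eq_or_lt_of_le hk1 with rfl | hlt
    · exact hcond.2
    · exact ih k (by omega) hk2
  | case2 j hcond =>
    intro k hk1 hk2
    rw [pvRunEnd, dif_neg hcond] at hk2
    omega

lemma pvRunEnd_stop (st : List String) (n j : Int) (h : j ≤ n) :
    pvRunEnd st n j = n ∨ pvColonAt st (pvRunEnd st n j) = false := by
  induction j using pvRunEnd.induct st n with
  | case1 j hcond ih => rw [pvRunEnd, dif_pos hcond]; exact ih (by omega)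
  | case2 j hcond =>
    rw [pvRunEnd, dif_neg hcond]
    rw [not_and_or] at hcond
    rcases hcond with hc | hc
    · left; omega
    · right; simpa using hc

-- pvOk's first conjunct is pvColonAt
lemma pvOk_false_of_no_colon (st : List String) (i : Int) (h : pvColonAt st i = false) :
    pvOk st i = false := by
  unfold pvOk; unfold pvColonAt at h; rw [h, Bool.false_and, Bool.false_and]

lemma pvOk_false_of_colon_left (st : List String) (i : Int) (h0 : 1 ≤ i)
    (h : pvColonAt st (i - 1) = true) : pvOk st i = false := by
  unfold pvOk; unfold pvColonAt at h
  have hz : (i == (0 : Int)) = false := by rw [beq_eq_false_iff_ne]; omega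
  rw [h, hz]
  simp

-- filter pvOk over an interval of colon indices whose left neighbor also has a colon is empty
lemma pvFilter_interior (st : List String) (a b : Int) (ha : 1 ≤ a)
    (hmem : ∀ k, a ≤ k → k < b → pvColonAt st (k - 1) = true) :
    (PySem.List.pyRange a b 1).filter (pvOk st) = [] := by
  rw [List.filter_eq_nil_iff]
  intro k hk
  rw [PySem.List.mem_pyRange_one] at hk
  rw [pvOk_false_of_colon_left st k (by omega) (hmem k hk.1 hk.2)]
  simp

-- B-side main lemma: the singleton-run starts from position i are the pvOk-filtered indices
lemma pvRunsCorrect (st : List String) :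
    ∀ (m : Nat) (i : Int), (((st.length : Int) - i)).toNat = m → 0 ≤ i →
    ((st.length : Int) ≤ i ∨ i = 0 ∨ pvColonAt st (i - 1) = false ∨ pvColonAt st i = false) →
    ((pvRuns st (st.length : Int) i).filter (fun p => p.2 - p.1 == 1)).map Prod.fst
      = (PySem.List.pyRange i (st.length : Int) 1).filter (pvOk st) := by
  intro m
  induction m using Nat.strong_induction_on with
  | _ m ih =>
    intro i hm h0 hyp
    set n : Int := (st.length : Int) with hn
    rw [pvRuns]
    by_cases hlt : i < n
    · rw [dif_pos hlt]
      by_cases hc : pvColonAt st i = true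
      · rw [dif_pos hc]
        -- colon run starting at i
        have hyp' : i = 0 ∨ pvColonAt st (i - 1) = false := by
          rcases hyp with h | h | h | h
          · omega
          · exact Or.inl h
          · exact Or.inr h
          · rw [hc] at h; exact absurd h (by simp)
        set j := pvRunEnd st n i with hj
        have hji : i + 1 ≤ j := pvRunEnd_step st n i ⟨hlt, hc⟩
        have hjn : j ≤ n := pvRunEnd_le st n i (by omega)
        have hrun : ∀ k, i ≤ k → k < j → pvColonAt st k = true := pvRunEnd_mem st n i
        have hstop : j = n ∨ pvColonAt st j = false := pvRunEnd_stop st n i (by omega)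
        -- recursive call at j
        have hypj : n ≤ j ∨ j = 0 ∨ pvColonAt st (j - 1) = false ∨ pvColonAt st j = false := by
          rcases hstop with h | h
          · exact Or.inl (le_of_eq h.symm)
          · exact Or.inr (Or.inr (Or.inr h))
        have hrec := ih (((n : Int) - j)).toNat (by omega) j rfl (by omega) hypj
        -- split the range at j
        have hsplit : PySem.List.pyRange i n 1
            = PySem.List.pyRange i j 1 ++ PySem.List.pyRange j n 1 :=
          PySem.List.pyRange_one_append i j n (by omega) hjn
        have hcons : PySem.List.pyRange i j 1 = i :: PySem.List.pyRange (i + 1) j 1 :=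
          PySem.List.pyRange_one_cons (by omega)
        have hint : (PySem.List.pyRange (i + 1) j 1).filter (pvOk st) = [] := by
          apply pvFilter_interior st (i + 1) j (by omega)
          intro k hk1 hk2
          exact hrun (k - 1) (by omega) (by omega)
        -- value of pvOk at i
        have hoki : pvOk st i = (j - i == 1) := by
          by_cases hsing : j = i + 1
          · have h3 : ((i == n - 1) || !(PySem.Str.isIn ":" (PySem.List.pyGetD st (i + 1) ""))) = true := by
              rcases hstop with h | h
              · have : (i == n - 1) = true := by rw [beq_iff_eq]; omega
                rw [this, Bool.true_or]
              · rw [hsing] at h; unfold pvColonAt at h; rw [h]; simp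
            have h2 : ((i == (0:Int)) || !(PySem.Str.isIn ":" (PySem.List.pyGetD st (i - 1) ""))) = true := by
              rcases hyp' with h | h
              · have : (i == (0:Int)) = true := by rw [beq_iff_eq]; exact h
                rw [this, Bool.true_or]
              · unfold pvColonAt at h; rw [h]; simp
            have hbeq : ((j - i : Int) == 1) = true := by rw [beq_iff_eq]; omega
            unfold pvOk; unfold pvColonAt at hc
            rw [hc, h2, h3, hbeq]
            simp
          · -- run longer than 1: colon at i+1, and i ≠ n - 1
            have hcol : pvColonAt st (i + 1) = true := hrun (i + 1) (by omega) (by omega)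
            have hne : (i == n - 1) = false := by rw [beq_eq_false_iff_ne]; omega
            have hbeq : ((j - i : Int) == 1) = false := by rw [beq_eq_false_iff_ne]; omega
            unfold pvOk; unfold pvColonAt at hcol
            rw [hcol, hne, hbeq]
            simp
        rw [hsplit, List.filter_append, hcons, List.filter_cons, List.filter_cons, hint,
          hoki, ← hrec]
        cases hb : ((j - i : Int) == 1) <;> simp
      · -- no colon at i: skip
        rw [dif_neg hc]
        have hrec := ih (((n : Int) - (i + 1))).toNat (by omega) (i + 1) rfl (by omega)
          (Or.inr (Or.inr (Or.inl (by simpa using (Bool.eq_false_iff.mpr hc)))))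
        have hcons : PySem.List.pyRange i n 1 = i :: PySem.List.pyRange (i + 1) n 1 :=
          PySem.List.pyRange_one_cons hlt
        rw [hcons, List.filter_cons,
          pvOk_false_of_no_colon st i (Bool.eq_false_iff.mpr hc), hrec]
        simp
    · rw [dif_neg hlt]
      rw [PySem.List.pyRange_one_eq_nil (by omega)]
      simp

-- ===== VERDICT (by name: the statement is the Claim_ definition above) =====
theorem get_error_line_indexes_py_spec : Claim_equal_get_error_line_indexes_py := by
  intro st _
  unfold Spec_get_error_line_indexes_py get_error_line_indexes_py get_error_line_indexes_py_alt
  have hB := pvRunsCorrect st ((st.length : Int) - 0).toNat 0 rfl le_rfl (Or.inr (Or.inl rfl))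
  have hA := pvLoop st st [] [] (by simp)
  rw [pvFlag_nil] at hA
  rw [hB] at *
  simpa using hA
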